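-- pv_equiv track=rewrite | github.com/kgalloway2/VSC-Code | python stuff/sushigo.py | score_wasabi
-- ===== SOURCE A (Python) =====
-- def score_wasabi(selected_cards):
--     wasabi_points = []
--     for i in selected_cards:
--         wasabi_indices = []
--         for x in range(len(i)):
--             if i[x] == "wasabi":
--                 wasabi_indices.append(x)
--
--         current_points = 0
--         for x in range(len(i)):
--             if i[x] == "squid":
--                 current_points += 3
--                 for y in wasabi_indices:
--                     if x > y:
--                         current_points += 6
--                         wasabi_indices.remove(y)
--                         break
--
--             elif i[x] == "salmon":
--                 current_points += 2
--                 for y in wasabi_indices: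
--                     if x > y:
--                         current_points += 4
--                         wasabi_indices.remove(y)
--                         break
--
--             elif i[x] == "egg":
--                 current_points += 1
--                 for y in wasabi_indices:
--                     if x > y:
--                         current_points += 2
--                         wasabi_indices.remove(y)
--                         break
--         wasabi_points.append(current_points)
--
--     return wasabi_points
-- ===== SOURCE B (Python) =====
-- _BASE = {"squid": 3, "salmon": 2, "egg": 1}
--
-- def _score_hand(hand):
--     # one pass: count unused preceding wasabi instead of tracking their indices
--     wasabi = 0
--     pts = 0
--     for card in hand:
--         if card == "wasabi":
--             wasabi += 1
--         else:
--             b = _BASE.get(card)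
--             if b is not None:
--                 if wasabi:
--                     pts += 3 * b
--                     wasabi -= 1
--                 else:
--                     pts += b
--     return pts
--
-- def score_wasabi(selected_cards):
--     return [_score_hand(hand) for hand in selected_cards]
-- ===== Notes on version B (the rewrite author's own statement) =====
-- stated objective: simpler
-- what changed: Replaced the per-hand index-list bookkeeping (build a list of wasabi indices, then for each nigiri scan and remove from it) by a single forward pass that keeps only a counter of unused preceding wasabi and a base-value table.
import Mathlib
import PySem

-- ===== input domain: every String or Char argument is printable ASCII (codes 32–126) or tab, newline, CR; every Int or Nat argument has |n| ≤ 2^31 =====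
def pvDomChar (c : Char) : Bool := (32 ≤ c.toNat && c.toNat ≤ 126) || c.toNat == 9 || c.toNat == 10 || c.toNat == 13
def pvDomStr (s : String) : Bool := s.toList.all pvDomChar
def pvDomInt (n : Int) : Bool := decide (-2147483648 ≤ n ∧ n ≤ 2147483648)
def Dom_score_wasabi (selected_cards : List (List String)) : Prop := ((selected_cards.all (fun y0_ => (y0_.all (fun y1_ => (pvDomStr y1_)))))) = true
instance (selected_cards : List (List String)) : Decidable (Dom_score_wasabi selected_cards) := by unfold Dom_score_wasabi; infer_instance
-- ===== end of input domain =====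

-- B replaces A's per-hand wasabi-index list (built by one index loop, then scanned
-- and mutated for every nigiri) by a single pass keeping a counter of unused
-- preceding wasabi and a base-value table; objective: simpler.

-- ===== PORT A =====
-- inner 'for y in wasabi_indices: if x > y: ... break' — first y with x > y, if any
def pvInnerA (x : Int) : List Int → Option Int
  | [] => none
  | y :: rest => if x > y then some y else pvInnerA x rest

-- one iteration of A's second loop; x comes from range(len(i)), so i[x] is in range
def pvStepA (i : List String) (st : Int × List Int) (x : Int) : Int × List Int :=
  let c := PySem.List.pyGetD i x ""
  if c == "squid" then
    match pvInnerA x st.2 with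
    | some y => (st.1 + 3 + 6, (PySem.List.remove? st.2 y).getD st.2)
    | none => (st.1 + 3, st.2)
  else if c == "salmon" then
    match pvInnerA x st.2 with
    | some y => (st.1 + 2 + 4, (PySem.List.remove? st.2 y).getD st.2)
    | none => (st.1 + 2, st.2)
  else if c == "egg" then
    match pvInnerA x st.2 with
    | some y => (st.1 + 1 + 2, (PySem.List.remove? st.2 y).getD st.2)
    | none => (st.1 + 1, st.2)
  else st

-- A's body for one hand i
def pvHandA (i : List String) : Int :=
  let wasabi_indices := (PySem.List.pyRange 0 (PySem.List.len i) 1).foldl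
      (fun acc x => if PySem.List.pyGetD i x "" == "wasabi" then acc ++ [x] else acc) []
  ((PySem.List.pyRange 0 (PySem.List.len i) 1).foldl (pvStepA i) (0, wasabi_indices)).1

def score_wasabi (selected_cards : List (List String)) : List Int :=
  selected_cards.foldl (fun acc i => acc ++ [pvHandA i]) []

-- ===== PORT B =====
def pvBase : PySem.Dict String Int :=
  PySem.Dict.ofList [("squid", 3), ("salmon", 2), ("egg", 1)]

def pvStepB (st : Int × Int) (card : String) : Int × Int :=
  if card == "wasabi" then (st.1 + 1, st.2)
  else
    match PySem.Dict.get? pvBase card with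
    | some b => if st.1 ≠ 0 then (st.1 - 1, st.2 + 3 * b) else (st.1, st.2 + b)
    | none => st

def pvHandB (hand : List String) : Int := (hand.foldl pvStepB (0, 0)).2

def score_wasabi_alt (selected_cards : List (List String)) : List Int :=
  selected_cards.map pvHandB

-- ===== PRECONDITION & SPEC =====
def Spec_score_wasabi (selected_cards : List (List String)) (out : List Int) : Prop := out = score_wasabi_alt selected_cards
instance (selected_cards : List (List String)) (out : List Int) : Decidable (Spec_score_wasabi selected_cards out) := by unfold Spec_score_wasabi; infer_instance

-- ===== CLAIM (what is proved, stated in full; the proofs are below) =====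
def Claim_equal_score_wasabi : Prop := ∀ (selected_cards : List (List String)), Dom_score_wasabi selected_cards → Spec_score_wasabi selected_cards (score_wasabi selected_cards)

-- ===== LEMMAS AND PROOFS =====

def pvWIdx (a : Int) : List String → List Int
  | [] => []
  | c :: t => if c == "wasabi" then a :: pvWIdx (a + 1) t else pvWIdx (a + 1) t

theorem pvWIdx_mem_ge (s : List String) : ∀ (a y : Int), y ∈ pvWIdx a s → a ≤ y := by
  induction s with
  | nil => intro a y h; simp [pvWIdx] at h
  | cons c t ih =>
    intro a y h
    simp only [pvWIdx] at h
    split at h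
    · rcases List.mem_cons.1 h with h | h
      · omega
      · have := ih (a + 1) y h; omega
    · have := ih (a + 1) y h; omega

theorem pvInnerA_none (x : Int) (L : List Int) (h : ∀ y ∈ L, ¬ x > y) : pvInnerA x L = none := by
  induction L with
  | nil => rfl
  | cons y rest ih =>
    simp only [pvInnerA]
    rw [if_neg (h y (List.mem_cons_self))]
    exact ih fun z hz => h z (List.mem_cons_of_mem _ hz)

theorem pvGetD_pre (pre : List String) (c : String) (t : List String) :
    PySem.List.pyGetD (pre ++ c :: t) (pre.length : Int) "" = c := by
  simp [PySem.List.pyGetD_natCast, List.getD]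

theorem pvBase_none (c : String) (h1 : ¬ c = "squid") (h2 : ¬ c = "salmon") (h3 : ¬ c = "egg") :
    PySem.Dict.get? pvBase c = none := by
  have hb : pvBase = PySem.Dict.mk [("squid", 3), ("salmon", 2), ("egg", 1)] := rfl
  rw [hb]
  simp [Ne.symm h1, Ne.symm h2, Ne.symm h3, PySem.Dict.get?]

theorem pvLoop2 (s : List String) : ∀ (pre : List String) (P : List Int) (pts : Int),
    (∀ y ∈ P, y < (pre.length : Int)) →
    ((PySem.List.pyRange (pre.length : Int) ((pre.length : Int) + (s.length : Int)) 1).foldl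
        (pvStepA (pre ++ s)) (pts, P ++ pvWIdx (pre.length : Int) s)).1
    = (s.foldl pvStepB ((P.length : Int), pts)).2 := by
  induction s with
  | nil =>
    intro pre P pts _
    rw [PySem.List.pyRange_one_eq_nil (by simp)]
    rfl
  | cons c t ih =>
    intro pre P pts hP
    rw [PySem.List.pyRange_one_cons (by push_cast [List.length_cons]; omega)]
    simp only [List.foldl_cons]
    have hpre : ((pre ++ [c]).length : Int) = (pre.length : Int) + 1 := by simp
    have hrange : ((pre.length : Int) + 1) + (t.length : Int) = (pre.length : Int) + ((c :: t).length : Int) := by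
      push_cast [List.length_cons]; ring
    have ih' := ih (pre ++ [c])
    rw [hpre, List.append_assoc] at ih'
    rw [hrange] at ih'
    have hF : ∀ y ∈ pvWIdx ((pre.length : Int) + 1) t, ¬ ((pre.length : Int) > y) := by
      intro y hy
      have := pvWIdx_mem_ge t ((pre.length : Int) + 1) y hy
      omega
    by_cases hw : c = "wasabi"
    · subst hw
      have hA : pvStepA (pre ++ "wasabi" :: t) (pts, P ++ pvWIdx (pre.length : Int) ("wasabi" :: t)) (pre.length : Int)
          = (pts, (P ++ [(pre.length : Int)]) ++ pvWIdx ((pre.length : Int) + 1) t) := by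
        simp [pvStepA, pvWIdx]
      rw [hA]
      have hP' : ∀ y ∈ P ++ [(pre.length : Int)], y < (pre.length : Int) + 1 := by
        intro y hy
        rcases List.mem_append.1 hy with h | h
        · have := hP y h; omega
        · simp at h; omega
      have h1 := ih' (P ++ [(pre.length : Int)]) pts hP'
      have hlen : (((P ++ [(pre.length : Int)]).length : Nat) : Int) = (P.length : Int) + 1 := by simp
      rw [hlen] at h1
      refine h1.trans ?_
      simp [pvStepB]
    · have hFs : pvWIdx (pre.length : Int) (c :: t) = pvWIdx ((pre.length : Int) + 1) t := by
        simp [pvWIdx, hw]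
      rw [hFs]
      have hsq : PySem.Dict.get? pvBase "squid" = some 3 := rfl
      have hsa : PySem.Dict.get? pvBase "salmon" = some 2 := rfl
      have heg : PySem.Dict.get? pvBase "egg" = some 1 := rfl
      by_cases hc1 : c = "squid"
      · subst hc1
        cases P with
        | nil =>
          have hnone : pvInnerA (pre.length : Int) (pvWIdx ((pre.length : Int) + 1) t) = none :=
            pvInnerA_none _ _ hF
          have hA : pvStepA (pre ++ "squid" :: t) (pts, [] ++ pvWIdx ((pre.length : Int) + 1) t) (pre.length : Int)
              = (pts + 3, [] ++ pvWIdx ((pre.length : Int) + 1) t) := by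
            simp [pvStepA, hnone]
          rw [hA]
          have h1 := ih' [] (pts + 3) (by simp)
          refine h1.trans ?_
          have hB : pvStepB ((([] : List Int).length : Int), pts) "squid" = ((([] : List Int).length : Int), pts + 3) := by
            simp [pvStepB, hsq]
          rw [hB]
        | cons p rest =>
          have hp : (pre.length : Int) > p := hP p List.mem_cons_self
          have hA : pvStepA (pre ++ "squid" :: t) (pts, (p :: rest) ++ pvWIdx ((pre.length : Int) + 1) t) (pre.length : Int)
              = (pts + 3 + 6, rest ++ pvWIdx ((pre.length : Int) + 1) t) := by
            simp [pvStepA, pvInnerA, hp, PySem.List.remove?_cons_self]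
          rw [hA]
          have h1 := ih' rest (pts + 3 + 6) (fun y hy => by have := hP y (List.mem_cons_of_mem _ hy); omega)
          refine h1.trans ?_
          have hB : pvStepB ((((p :: rest).length : Nat) : Int), pts) "squid" = (((rest.length : Nat) : Int), pts + 3 + 6) := by
            simp [pvStepB, hsq]
            rw [if_neg (show ¬((rest.length : Int) + 1 = 0) by omega)]
            refine Prod.ext ?_ ?_ <;> omega
          rw [hB]
      · by_cases hc2 : c = "salmon"
        · subst hc2
          cases P with
          | nil =>
            have hnone : pvInnerA (pre.length : Int) (pvWIdx ((pre.length : Int) + 1) t) = none :=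
              pvInnerA_none _ _ hF
            have hA : pvStepA (pre ++ "salmon" :: t) (pts, [] ++ pvWIdx ((pre.length : Int) + 1) t) (pre.length : Int)
                = (pts + 2, [] ++ pvWIdx ((pre.length : Int) + 1) t) := by
              simp [pvStepA, hnone]
            rw [hA]
            have h1 := ih' [] (pts + 2) (by simp)
            refine h1.trans ?_
            have hB : pvStepB ((([] : List Int).length : Int), pts) "salmon" = ((([] : List Int).length : Int), pts + 2) := by
              simp [pvStepB, hsa]
            rw [hB]
          | cons p rest =>
            have hp : (pre.length : Int) > p := hP p List.mem_cons_self
            have hA : pvStepA (pre ++ "salmon" :: t) (pts, (p :: rest) ++ pvWIdx ((pre.length : Int) + 1) t) (pre.length : Int)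
                = (pts + 2 + 4, rest ++ pvWIdx ((pre.length : Int) + 1) t) := by
              simp [pvStepA, pvInnerA, hp, PySem.List.remove?_cons_self]
            rw [hA]
            have h1 := ih' rest (pts + 2 + 4) (fun y hy => by have := hP y (List.mem_cons_of_mem _ hy); omega)
            refine h1.trans ?_
            have hB : pvStepB ((((p :: rest).length : Nat) : Int), pts) "salmon" = (((rest.length : Nat) : Int), pts + 2 + 4) := by
              simp [pvStepB, hsa]
              rw [if_neg (show ¬((rest.length : Int) + 1 = 0) by omega)]
              refine Prod.ext ?_ ?_ <;> omega
            rw [hB]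
        by_cases hc3 : c = "egg"
        · subst hc3
          cases P with
          | nil =>
            have hnone : pvInnerA (pre.length : Int) (pvWIdx ((pre.length : Int) + 1) t) = none :=
              pvInnerA_none _ _ hF
            have hA : pvStepA (pre ++ "egg" :: t) (pts, [] ++ pvWIdx ((pre.length : Int) + 1) t) (pre.length : Int)
                = (pts + 1, [] ++ pvWIdx ((pre.length : Int) + 1) t) := by
              simp [pvStepA, hnone]
            rw [hA]
            have h1 := ih' [] (pts + 1) (by simp)
            refine h1.trans ?_
            have hB : pvStepB ((([] : List Int).length : Int), pts) "egg" = ((([] : List Int).length : Int), pts + 1) := by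
              simp [pvStepB, heg]
            rw [hB]
          | cons p rest =>
            have hp : (pre.length : Int) > p := hP p List.mem_cons_self
            have hA : pvStepA (pre ++ "egg" :: t) (pts, (p :: rest) ++ pvWIdx ((pre.length : Int) + 1) t) (pre.length : Int)
                = (pts + 1 + 2, rest ++ pvWIdx ((pre.length : Int) + 1) t) := by
              simp [pvStepA, pvInnerA, hp, PySem.List.remove?_cons_self]
            rw [hA]
            have h1 := ih' rest (pts + 1 + 2) (fun y hy => by have := hP y (List.mem_cons_of_mem _ hy); omega)
            refine h1.trans ?_
            have hB : pvStepB ((((p :: rest).length : Nat) : Int), pts) "egg" = (((rest.length : Nat) : Int), pts + 1 + 2) := by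
              simp [pvStepB, heg]
              rw [if_neg (show ¬((rest.length : Int) + 1 = 0) by omega)]
              refine Prod.ext ?_ ?_ <;> omega
            rw [hB]
        · -- card scores nothing: both steps leave the state unchanged
          have hA : pvStepA (pre ++ c :: t) (pts, P ++ pvWIdx ((pre.length : Int) + 1) t) (pre.length : Int)
              = (pts, P ++ pvWIdx ((pre.length : Int) + 1) t) := by
            simp [pvStepA, beq_iff_eq, hc1, hc2, hc3]
          rw [hA]
          have h1 := ih' P pts (fun y hy => by have := hP y hy; omega)
          refine h1.trans ?_
          have hB : pvStepB ((P.length : Int), pts) c = ((P.length : Int), pts) := by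
            simp [pvStepB, pvBase_none c hc1 hc2 hc3, beq_iff_eq, hw]
          rw [hB]

theorem pvLoop1 (s : List String) : ∀ (pre : List String) (acc : List Int),
    ((PySem.List.pyRange (pre.length : Int) ((pre.length : Int) + (s.length : Int)) 1).foldl
      (fun acc x => if PySem.List.pyGetD (pre ++ s) x "" == "wasabi" then acc ++ [x] else acc) acc)
    = acc ++ pvWIdx (pre.length : Int) s := by
  induction s with
  | nil => intro pre acc; rw [PySem.List.pyRange_one_eq_nil (by simp)]; simp [pvWIdx]
  | cons c t ih =>
    intro pre acc
    rw [PySem.List.pyRange_one_cons (by push_cast [List.length_cons]; omega)]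
    simp only [List.foldl_cons, pvGetD_pre]
    have hpre : ((pre ++ [c]).length : Int) = (pre.length : Int) + 1 := by simp
    have hrange : ((pre.length : Int) + 1) + (t.length : Int) = (pre.length : Int) + ((c :: t).length : Int) := by
      push_cast [List.length_cons]; ring
    have this1 := ih (pre ++ [c])
    rw [hpre, List.append_assoc] at this1
    simp only [List.cons_append, List.nil_append] at this1
    rw [hrange] at this1
    by_cases hc : c == "wasabi"
    · rw [if_pos hc]
      refine (this1 (acc ++ [(pre.length : Int)])).trans ?_
      simp [pvWIdx, hc]
    · rw [if_neg hc]
      refine (this1 acc).trans ?_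
      simp [pvWIdx, hc]

theorem pvHand_eq (i : List String) : pvHandA i = pvHandB i := by
  have h1 := pvLoop1 i [] []
  have h2 := pvLoop2 i [] [] 0 (by simp)
  simp only [List.length_nil, Nat.cast_zero, List.nil_append, zero_add] at h1 h2
  simp only [pvHandA, pvHandB, PySem.List.len_eq]
  exact (congrArg (fun W => (List.foldl (pvStepA i) ((0 : Int), W) (PySem.List.pyRange 0 (i.length : Int) 1)).1) h1).trans h2

-- ===== VERDICT (by name: the statement is the Claim_ definition above) =====
theorem score_wasabi_spec : Claim_equal_score_wasabi := by
  intro selected_cards _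
  unfold Spec_score_wasabi score_wasabi score_wasabi_alt
  rw [PySem.List.foldl_append_singleton_eq_map]
  exact List.map_congr_left (fun i _ => pvHand_eq i)
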